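-- pv_equiv track=rewrite | github.com/Stariy-Chainik/fokus-bot | bot/keyboards/calendar.py | _shift_month
-- ===== SOURCE A (Python) =====
-- def _shift_month(year: int, month: int, delta: int) -> tuple[int, int]:
--     m = month + delta
--     y = year
--     while m < 1:
--         m += 12
--         y -= 1
--     while m > 12:
--         m -= 12
--         y += 1
--     return y, m
-- ===== SOURCE B (Python) =====
-- def _shift_month(year: int, month: int, delta: int) -> tuple[int, int]:
--     idx = month - 1 + delta
--     return year + idx // 12, idx % 12 + 1
-- ===== Notes on version B (the rewrite author's own statement) =====
-- stated objective: simpler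
-- what changed: Replaced the two normalization while-loops with a single closed-form floor-divmod computation on month-1+delta.
import Mathlib
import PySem

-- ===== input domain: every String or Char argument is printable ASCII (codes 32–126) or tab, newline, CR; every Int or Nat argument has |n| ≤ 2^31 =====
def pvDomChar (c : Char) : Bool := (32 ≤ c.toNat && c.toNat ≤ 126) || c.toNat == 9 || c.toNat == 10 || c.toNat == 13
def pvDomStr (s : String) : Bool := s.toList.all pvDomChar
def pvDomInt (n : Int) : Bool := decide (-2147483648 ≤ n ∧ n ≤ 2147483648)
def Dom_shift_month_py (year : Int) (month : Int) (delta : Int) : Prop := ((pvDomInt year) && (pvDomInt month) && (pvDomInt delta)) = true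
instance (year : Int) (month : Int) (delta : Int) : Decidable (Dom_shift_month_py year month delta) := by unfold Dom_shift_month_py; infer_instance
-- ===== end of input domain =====

-- B replaces A's two while-loops by one closed-form floor-divmod; objective: simpler.

-- ===== PORT A =====
-- first while-loop: while m < 1: m += 12; y -= 1
def shiftMonthLoop1 (y m : Int) : Int × Int :=
  if m < 1 then shiftMonthLoop1 (y - 1) (m + 12) else (y, m)
termination_by (1 - m).toNat
decreasing_by omega

-- second while-loop: while m > 12: m -= 12; y += 1
def shiftMonthLoop2 (y m : Int) : Int × Int :=
  if m > 12 then shiftMonthLoop2 (y + 1) (m - 12) else (y, m)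
termination_by (m - 12).toNat
decreasing_by omega

def shift_month_py (year : Int) (month : Int) (delta : Int) : Int × Int :=
  let m := month + delta
  let y := year
  let p := shiftMonthLoop1 y m
  shiftMonthLoop2 p.1 p.2

-- ===== PORT B =====
def shift_month_py_alt (year : Int) (month : Int) (delta : Int) : Int × Int :=
  let idx := month - 1 + delta
  (year + PySem.Int.floordiv idx 12, PySem.Int.mod idx 12 + 1)

-- ===== PRECONDITION & SPEC =====
def Spec_shift_month_py (year : Int) (month : Int) (delta : Int) (out : Int × Int) : Prop := out = shift_month_py_alt year month delta
instance (year : Int) (month : Int) (delta : Int) (out : Int × Int) : Decidable (Spec_shift_month_py year month delta out) := by unfold Spec_shift_month_py; infer_instance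

-- ===== CLAIM (what is proved, stated in full; the proofs are below) =====
def Claim_equal_shift_month_py : Prop := ∀ (year : Int) (month : Int) (delta : Int), Dom_shift_month_py year month delta → Spec_shift_month_py year month delta (shift_month_py year month delta)

-- ===== LEMMAS AND PROOFS =====

-- the closed-form invariant both loops preserve
def shiftMonthNorm (p : Int × Int) : Int × Int :=
  (p.1 + PySem.Int.floordiv (p.2 - 1) 12, PySem.Int.mod (p.2 - 1) 12 + 1)

theorem norm_shift (y m : Int) : shiftMonthNorm (y - 1, m + 12) = shiftMonthNorm (y, m) := by
  simp only [shiftMonthNorm, PySem.Int.floordiv, PySem.Int.mod, Prod.mk.injEq]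
  refine ⟨?_, ?_⟩
  · have h : m + 12 - 1 = (m - 1) + 1 * 12 := by ring
    rw [h, Int.add_mul_fdiv_right _ _ (by norm_num)]
    ring
  · have h : m + 12 - 1 = (m - 1) + 1 * 12 := by ring
    rw [h, Int.add_mul_fmod_self_right]

theorem norm_shift' (y m : Int) : shiftMonthNorm (y + 1, m - 12) = shiftMonthNorm (y, m) := by
  have := norm_shift (y + 1) (m - 12)
  simpa using this.symm

theorem loop1_norm (y m : Int) : shiftMonthNorm (shiftMonthLoop1 y m) = shiftMonthNorm (y, m) := by
  rw [shiftMonthLoop1]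
  split
  · rw [loop1_norm, norm_shift]
  · rfl
termination_by (1 - m).toNat
decreasing_by omega

theorem loop2_norm (y m : Int) : shiftMonthNorm (shiftMonthLoop2 y m) = shiftMonthNorm (y, m) := by
  rw [shiftMonthLoop2]
  split
  · rw [loop2_norm, norm_shift']
  · rfl
termination_by (m - 12).toNat
decreasing_by omega

theorem loop1_ge (y m : Int) : 1 ≤ (shiftMonthLoop1 y m).2 := by
  rw [shiftMonthLoop1]
  split
  · exact loop1_ge _ _
  · simpa using by omega
termination_by (1 - m).toNat
decreasing_by omega

theorem loop2_bounds (y m : Int) (h : 1 ≤ m) :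
    1 ≤ (shiftMonthLoop2 y m).2 ∧ (shiftMonthLoop2 y m).2 ≤ 12 := by
  rw [shiftMonthLoop2]
  split
  · exact loop2_bounds _ _ (by omega)
  · simpa using by omega
termination_by (m - 12).toNat
decreasing_by omega

theorem norm_fixed (p : Int × Int) (h1 : 1 ≤ p.2) (h2 : p.2 ≤ 12) : shiftMonthNorm p = p := by
  obtain ⟨y, m⟩ := p
  simp only [shiftMonthNorm]
  rw [PySem.Int.floordiv_eq_ediv_of_pos (by norm_num), PySem.Int.mod_eq_emod_of_pos (by norm_num)]
  have hd : (m - 1) / 12 = 0 := Int.ediv_eq_zero_of_lt (by omega) (by omega)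
  have hm : (m - 1) % 12 = m - 1 := Int.emod_eq_of_lt (by omega) (by omega)
  simp [hd, hm]

-- ===== VERDICT (by name: the statement is the Claim_ definition above) =====
theorem shift_month_py_spec : Claim_equal_shift_month_py := by
  intro year month delta _
  unfold Spec_shift_month_py shift_month_py shift_month_py_alt
  have h1 := loop1_norm year (month + delta)
  set p := shiftMonthLoop1 year (month + delta) with hp
  have h2 := loop2_norm p.1 p.2
  have hb := loop2_bounds p.1 p.2 (loop1_ge year (month + delta))
  have hfix := norm_fixed _ hb.1 hb.2
  have : shiftMonthLoop2 p.1 p.2 = shiftMonthNorm (year, month + delta) := by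
    rw [← hfix, h2]
    simpa using h1
  rw [this]
  simp only [shiftMonthNorm, Prod.mk.injEq]
  refine ⟨by ring_nf, by ring_nf⟩
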